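-- pv_equiv track=rewrite | github.com/rupertl/gridlock | columns.py | paste_columns
-- ===== SOURCE A (Python) =====
-- def paste_columns(columns, boxed=False):
--     """Paste a list of columns back together."""
--     page = []
--     num_rows = max((len(col) for col in columns))
--     if num_rows == 0:
--         return ""
--     col_pad = []
--     for col in columns:
--         if len(col) == 0:
--             col_pad.append(0)
--         else:
--             lengths = (len(row) for row in col)
--             col_pad.append(max(lengths))
--     if boxed:
--         box_top_bot = ''
--         for col_len in col_pad:
--             box_top_bot += '+'
--             box_top_bot += '-' * col_len
--         box_top_bot += '+\n'
--         page.append(box_top_bot)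
--     for row_index in range(num_rows):
--         row = '|' if boxed else ''
--         for col_index, col in enumerate(columns):
--             field = ''
--             if row_index < len(col):
--                 field = col[row_index]
--             field = field.ljust(col_pad[col_index])
--             field += '|' if boxed else ''
--             row += field
--         row += '\n'
--         page.append(row)
--     if boxed:
--         page.append(box_top_bot)
--     return page
-- ===== SOURCE B (Python) =====
-- def paste_columns(columns, boxed=False):
--     """Paste columns column-major: fold each column into growing row buffers and the border."""
--     num_rows = max(len(col) for col in columns)
--     if num_rows == 0:
--         return ""
--     sep = '|' if boxed else ''
--     rows = [sep] * num_rows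
--     border = '+'
--     for col in columns:
--         w = max((len(cell) for cell in col), default=0)
--         border += '-' * w + '+'
--         cells = col + [''] * (num_rows - len(col))
--         rows = [r + cell.ljust(w) + sep for r, cell in zip(rows, cells)]
--     rows = [r + '\n' for r in rows]
--     if not boxed:
--         return rows
--     border += '\n'
--     return [border] + rows + [border]
-- ===== Notes on version B (the rewrite author's own statement) =====
-- stated objective: alternative
-- what changed: B traverses column-major instead of A's row-major nested loop: a single fold over the columns grows every row buffer and the box border at once (each column is consumed whole, its width computed and applied on the spot), whereas A precomputes a col_pad table and then, for each row index, re-scans all columns with enumerate lookups into that table.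
-- outside the precondition, e.g. on paste_columns([], False): A raises ValueError, B raises ValueError; on paste_columns([[], []], False): A returns '', B returns ''
import Mathlib
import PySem

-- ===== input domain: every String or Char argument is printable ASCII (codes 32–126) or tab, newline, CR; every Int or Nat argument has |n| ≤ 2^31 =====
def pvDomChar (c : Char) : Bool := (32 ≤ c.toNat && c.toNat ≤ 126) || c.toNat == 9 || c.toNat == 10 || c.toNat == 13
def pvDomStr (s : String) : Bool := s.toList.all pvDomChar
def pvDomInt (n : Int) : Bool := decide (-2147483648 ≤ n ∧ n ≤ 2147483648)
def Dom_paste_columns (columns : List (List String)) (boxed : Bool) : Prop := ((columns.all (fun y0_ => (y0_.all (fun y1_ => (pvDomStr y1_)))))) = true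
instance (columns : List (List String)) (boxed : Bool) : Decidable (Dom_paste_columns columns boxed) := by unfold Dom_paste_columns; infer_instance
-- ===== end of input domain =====

-- B builds the page column-major: one fold over the columns grows all row buffers and the
-- border at once, instead of A's row-major nested loop over a precomputed col_pad table;
-- objective: alternative decomposition, same cost. Equal return value on Pre_.

-- str.ljust(w): pad on the right with spaces to width w (exact on these inputs)
def pvLjust (cs : List Char) (w : Nat) : List Char := cs ++ List.replicate (w - cs.length) ' '

-- ===== PORT A =====
def paste_columns (columns : List (List String)) (boxed : Bool) : List String :=
  -- num_rows = max(len(col) for col in columns); max? is none (Python: ValueError) iff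
  -- columns = [], which Pre_ excludes, so the .getD 0 default is never reached there
  let num_rows : Nat := (PySem.List.max? (columns.map (fun col => col.length)) (fun x => x)).getD 0
  if num_rows == 0 then []  -- Python returns the str "" here, not a list[str]; excluded by Pre_
  else
    let col_pad : List Nat := columns.foldl (fun acc col =>
      acc ++ [if col.length == 0 then 0
              -- col is nonempty in this branch, so max? is some and .getD 0 is never the default
              else (PySem.List.max? (col.map (fun row => row.toList.length)) (fun x => x)).getD 0]) []
    let box_top_bot : List Char :=
      (col_pad.foldl (fun s col_len => s ++ '+' :: List.replicate col_len '-') []) ++ ['+', '\n']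
    let page0 : List String := if boxed then [String.mk box_top_bot] else []
    let page := (List.range num_rows).foldl (fun page row_index =>
      let row0 : List Char := if boxed then ['|'] else []
      let row := (PySem.List.enumerate columns 0).foldl (fun row ic =>
        let field : List Char := if row_index < ic.2.length then (ic.2.getD row_index "").toList else []
        let field := pvLjust field (PySem.List.pyGetD col_pad ic.1 0)
        let field := field ++ (if boxed then ['|'] else [])
        row ++ field) row0
      page ++ [String.mk (row ++ ['\n'])]) page0
    if boxed then page ++ [String.mk box_top_bot] else page

-- ===== PORT B =====
-- max((len(cell) for cell in col), default=0)
def pvColWidth (col : List String) : Nat :=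
  PySem.List.maxD (col.map (fun cell => cell.toList.length)) (fun x => x) 0

def paste_columns_alt (columns : List (List String)) (boxed : Bool) : List String :=
  -- max(len(col) for col in columns); none (ValueError) iff columns = [], excluded by Pre_
  let num_rows : Nat := (PySem.List.max? (columns.map (fun col => col.length)) (fun x => x)).getD 0
  if num_rows == 0 then []  -- Python B returns the str "" here, like A; excluded by Pre_
  else
    let sep : List Char := if boxed then ['|'] else []
    -- single column-major fold: state = (row buffers, border so far)
    let st := columns.foldl (fun (st : List (List Char) × List Char) col =>
      let w := pvColWidth col
      let border := st.2 ++ List.replicate w '-' ++ ['+']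
      let cells := col ++ List.replicate (num_rows - col.length) ""
      let rows := (st.1.zip cells).map (fun rc => rc.1 ++ pvLjust rc.2.toList w ++ sep)
      (rows, border)) (List.replicate num_rows sep, ['+'])
    let rows := st.1.map (fun r => String.mk (r ++ ['\n']))
    if !boxed then rows
    else
      let border := String.mk (st.2 ++ ['\n'])
      border :: rows ++ [border]

-- ===== PRECONDITION & SPEC =====
-- Pre_ excludes columns = [] (Python A raises ValueError on max of an empty generator) and
-- inputs whose columns are all empty (num_rows == 0), where A returns the str "" instead of a list[str].
def Pre_paste_columns (columns : List (List String)) (boxed : Bool) : Prop :=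
  ∃ col ∈ columns, col ≠ []
instance (columns : List (List String)) (boxed : Bool) : Decidable (Pre_paste_columns columns boxed) := by unfold Pre_paste_columns; infer_instance
def pvWitness_paste_columns : List (List String) × Bool := ([["ab", "c"], ["xyz"]], true)

def Spec_paste_columns (columns : List (List String)) (boxed : Bool) (out : List String) : Prop := out = paste_columns_alt columns boxed
instance (columns : List (List String)) (boxed : Bool) (out : List String) : Decidable (Spec_paste_columns columns boxed out) := by unfold Spec_paste_columns; infer_instance

-- ===== CLAIM (what is proved, stated in full; the proofs are below) =====
def Claim_equal_paste_columns : Prop := ∀ (columns : List (List String)) (boxed : Bool), Dom_paste_columns columns boxed → Pre_paste_columns columns boxed → Spec_paste_columns columns boxed (paste_columns columns boxed)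

-- ===== LEMMAS AND PROOFS =====

-- the padded-and-separated cell of column c at row i (proof-side abbreviation)
def pvCellS (sep : List Char) (i : Nat) (c : List String) : List Char :=
  pvLjust (if i < c.length then (c.getD i "").toList else []) (pvColWidth c) ++ sep

-- A's col_pad entry for one column equals B's width of that column
lemma pad_entry_eq (col : List String) :
    (if col.length == 0 then 0
     else (PySem.List.max? (col.map (fun row => row.toList.length)) (fun x => x)).getD 0)
      = pvColWidth col := by
  cases col with
  | nil => simp [pvColWidth, PySem.List.maxD, PySem.List.max?]
  | cons h t => simp [pvColWidth, PySem.List.maxD]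

-- A's enumerate-indexed inner loop is a plain fold over the per-column cells
lemma inner_fold_eq (i : Nat) (sep : List Char) :
    ∀ (cols : List (List String)) (pre : List Nat) (acc : List Char),
    (PySem.List.enumerate cols (pre.length : Int)).foldl (fun row ic =>
        row ++ (pvLjust (if i < ic.2.length then (ic.2.getD i "").toList else [])
                  (PySem.List.pyGetD (pre ++ cols.map pvColWidth) ic.1 0) ++ sep)) acc
      = (cols.map (fun c => pvLjust (if i < c.length then (c.getD i "").toList else []) (pvColWidth c))).foldl
          (fun row c => row ++ (c ++ sep)) acc := by
  intro cols
  induction cols with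
  | nil => simp [PySem.List.enumerate]
  | cons c rest ih =>
    intro pre acc
    rw [PySem.List.enumerate_cons]
    simp only [List.foldl_cons, List.map_cons]
    have hget : PySem.List.pyGetD (pre ++ pvColWidth c :: rest.map pvColWidth) (pre.length : Int) 0
        = pvColWidth c := by
      rw [PySem.List.pyGetD_natCast]
      simp [List.getD_eq_getElem?_getD]
    have harg : (pre.length : Int) + 1 = ((pre ++ [pvColWidth c]).length : Int) := by simp
    rw [hget, harg]
    have := ih (pre ++ [pvColWidth c])
        (acc ++ (pvLjust (if i < c.length then (c.getD i "").toList else []) (pvColWidth c) ++ sep))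
    simpa using this

-- A's border pieces '+(---)' re-bracketed as B's '(---)+' pieces
lemma shift_plus : ∀ ws : List Nat,
    (ws.flatMap (fun l => '+' :: List.replicate l '-')) ++ ['+']
      = '+' :: ws.flatMap (fun w => List.replicate w '-' ++ ['+']) := by
  intro ws
  induction ws with
  | nil => rfl
  | cons w rest ih => simp [List.flatMap_cons, ih]

-- a list of length n is the map of its own elements over range n
lemma self_eq_map_range {α : Type} (rs : List α) (d : α) (n : Nat) (h : rs.length = n) :
    rs = (List.range n).map (fun i => rs.getD i d) := by
  apply List.ext_getElem (by simp [h])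
  intro i h1 h2
  simp [List.getD_eq_getElem?_getD, List.getElem?_eq_getElem h1]

-- invariant of B's column-major fold: row buffers grow by one cell per column,
-- the border by one '---+' piece per column
lemma bfold (n : Nat) (sep : List Char) :
    ∀ (cols : List (List String)) (rs : List (List Char)) (b : List Char),
    rs.length = n → (∀ c ∈ cols, c.length ≤ n) →
    cols.foldl (fun (st : List (List Char) × List Char) col =>
        let w := pvColWidth col
        let border := st.2 ++ List.replicate w '-' ++ ['+']
        let cells := col ++ List.replicate (n - col.length) ""
        let rows := (st.1.zip cells).map (fun rc => rc.1 ++ pvLjust rc.2.toList w ++ sep)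
        (rows, border)) (rs, b)
      = ((List.range n).map (fun i => rs.getD i [] ++ cols.flatMap (pvCellS sep i)),
         b ++ cols.flatMap (fun c => List.replicate (pvColWidth c) '-' ++ ['+'])) := by
  intro cols
  induction cols with
  | nil =>
    intro rs b h _
    simp only [List.foldl_nil, List.flatMap_nil, List.append_nil]
    exact Prod.ext (self_eq_map_range rs [] n h) rfl
  | cons col rest ih =>
    intro rs b h hle
    have hcol : col.length ≤ n := hle col (by simp)
    have hcells : (col ++ List.replicate (n - col.length) "").length = n := by
      simp; omega
    rw [List.foldl_cons]
    have hlen : ((rs.zip (col ++ List.replicate (n - col.length) "")).map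
        (fun rc => rc.1 ++ pvLjust rc.2.toList (pvColWidth col) ++ sep)).length = n := by
      simp [h, hcells]
    rw [ih _ _ hlen (fun c hc => hle c (by simp [hc]))]
    refine Prod.ext ?_ (by simp)
    apply List.map_congr_left
    intro i hi
    have hin : i < n := List.mem_range.mp hi
    have hgd : ((rs.zip (col ++ List.replicate (n - col.length) "")).map
        (fun rc => rc.1 ++ pvLjust rc.2.toList (pvColWidth col) ++ sep)).getD i []
        = rs.getD i [] ++ pvCellS sep i col := by
      have hi1 : i < ((rs.zip (col ++ List.replicate (n - col.length) "")).map
          (fun rc => rc.1 ++ pvLjust rc.2.toList (pvColWidth col) ++ sep)).length := by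
        rw [hlen]; exact hin
      rw [List.getD_eq_getElem _ _ hi1, List.getElem_map, List.getElem_zip]
      have hcell : (col ++ List.replicate (n - col.length) "")[i]'(by rw [hcells]; exact hin)
          = if i < col.length then col.getD i "" else "" := by
        by_cases hc : i < col.length
        · rw [List.getElem_append_left hc]
          simp [hc]
        · rw [List.getElem_append_right (by omega)]
          simp [hc]
      rw [hcell]
      have hrs : rs[i]'(by rw [h]; exact hin) = rs.getD i [] := by
        rw [List.getD_eq_getElem _ _ (by rw [h]; exact hin)]
      rw [hrs]
      by_cases hc : i < col.length <;> simp [pvCellS, hc]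
    rw [hgd, List.flatMap_cons, List.append_assoc]

-- every column's height is at most num_rows (= max of the heights), columns nonempty
lemma len_le_max (columns : List (List String)) (hne : columns ≠ []) :
    ∀ c ∈ columns, c.length ≤
      (PySem.List.max? (columns.map (fun col => col.length)) (fun x => x)).getD 0 := by
  intro c hc
  cases hmax : PySem.List.max? (columns.map (fun col => col.length)) (fun x => x) with
  | none =>
    exact absurd (by simpa using ((PySem.List.max?_eq_none_iff _ _).mp hmax)) hne
  | some m =>
    have := PySem.List.max?_isMax hmax c.length (List.mem_map_of_mem hc)
    simpa using this

-- ===== VERDICT (by name: the statement is the Claim_ definition above) =====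
theorem paste_columns_spec : Claim_equal_paste_columns := by
  intro columns boxed _ hpre
  obtain ⟨c0, hc0mem, -⟩ := hpre
  have hcols : columns ≠ [] := by rintro rfl; cases hc0mem
  show paste_columns columns boxed = paste_columns_alt columns boxed
  simp only [paste_columns, paste_columns_alt]
  split
  · rfl
  · -- abbreviations
    set n := (PySem.List.max? (columns.map (fun col => col.length)) (fun x => x)).getD 0 with hn
    set sep : List Char := if boxed then ['|'] else [] with hsep
    -- A's col_pad is the width map
    have hpad : columns.foldl (fun acc col =>
        acc ++ [if col.length == 0 then 0
                else (PySem.List.max? (col.map (fun row => row.toList.length)) (fun x => x)).getD 0])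
        ([] : List Nat) = columns.map pvColWidth := by
      rw [PySem.List.foldl_append_singleton_eq_map]
      simp only [List.nil_append]
      exact List.map_congr_left (fun a _ => pad_entry_eq a)
    rw [hpad]
    -- B's fold, characterized
    rw [bfold n sep columns (List.replicate n sep) ['+'] (by simp) (len_le_max columns hcols)]
    -- A's outer loop as a map over range n
    rw [PySem.List.foldl_append_singleton_eq_map]
    -- A's border as flatMap
    rw [PySem.List.foldl_append_eq_flatMap]
    simp only [List.nil_append]
    -- each of A's rows equals the corresponding B row buffer
    have hrow : ∀ i ∈ List.range n,
        String.mk ((PySem.List.enumerate columns 0).foldl (fun row ic =>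
            row ++ (pvLjust (if i < ic.2.length then (ic.2.getD i "").toList else [])
                      (PySem.List.pyGetD (columns.map pvColWidth) ic.1 0) ++ sep)) sep ++ ['\n'])
          = String.mk (((List.replicate n sep).getD i [] ++ columns.flatMap (pvCellS sep i)) ++ ['\n']) := by
      intro i hi
      have h1 := inner_fold_eq i sep columns [] sep
      simp only [List.length_nil, Nat.cast_zero, List.nil_append] at h1
      rw [h1, PySem.List.foldl_append_eq_flatMap]
      have h2 : (columns.map (fun c =>
          pvLjust (if i < c.length then (c.getD i "").toList else []) (pvColWidth c))).flatMap
            (fun c => c ++ sep) = columns.flatMap (pvCellS sep i) := by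
        rw [List.flatMap_map]
        rfl
      rw [h2]
      congr 1
      have : (List.replicate n sep).getD i [] = sep := by
        rw [List.getD_eq_getElem _ _ (by simpa using List.mem_range.mp hi)]
        simp
      rw [this]
    -- assemble: the map functions agree row by row
    have hmap : (List.range n).map (fun i =>
        String.mk ((PySem.List.enumerate columns 0).foldl (fun row ic =>
            row ++ (pvLjust (if i < ic.2.length then (ic.2.getD i "").toList else [])
                      (PySem.List.pyGetD (columns.map pvColWidth) ic.1 0) ++ sep)) sep ++ ['\n']))
        = ((List.range n).map (fun i => (List.replicate n sep).getD i [] ++ columns.flatMap (pvCellS sep i))).map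
            (fun r => String.mk (r ++ ['\n'])) := by
      rw [List.map_map]
      exact List.map_congr_left hrow
    -- the two borders agree
    have hbord : (columns.map pvColWidth).flatMap (fun col_len => '+' :: List.replicate col_len '-') ++ ['+', '\n']
        = ('+' :: columns.flatMap (fun c => List.replicate (pvColWidth c) '-' ++ ['+'])) ++ ['\n'] := by
      have h0 := shift_plus (columns.map pvColWidth)
      rw [List.flatMap_map, List.flatMap_map] at h0
      rw [List.flatMap_map, show (['+', '\n'] : List Char) = ['+'] ++ ['\n'] from rfl,
          ← List.append_assoc, h0]
    rw [hmap, hbord]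
    cases boxed <;> simp
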